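-- pv_equiv track=rewrite | github.com/tridibbanik17/Python | Computing_Final_Preparation.py | curve
-- ===== SOURCE A (Python) =====
-- def curve(grades:list):
--     best = max(grades)
--     letter_grades_list = []
--     for i in range(len(grades)):
--         if grades[i] >= (best - 10):
--             letter_grades_list.append('A')
--         elif grades[i] >= (best - 20):
--             letter_grades_list.append('B')
--         elif grades[i] >= (best - 30):
--             letter_grades_list.append('C')
--         elif grades[i] >= (best - 40):
--             letter_grades_list.append('D')
--         else:
--             letter_grades_list.append('F')
--     return letter_grades_list
-- ===== SOURCE B (Python) =====
-- def curve(grades: list):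
--     best = max(grades)
--     return ["ABCDF"[min(4, max(0, (best - g - 1) // 10))] for g in grades]
-- ===== Notes on version B (the rewrite author's own statement) =====
-- stated objective: simpler
-- what changed: Replaces the five-way if-elif cascade with a closed-form index min(4, max(0, (best-g-1)//10)) into the letter table 'ABCDF', built by a single comprehension.
import Mathlib
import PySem

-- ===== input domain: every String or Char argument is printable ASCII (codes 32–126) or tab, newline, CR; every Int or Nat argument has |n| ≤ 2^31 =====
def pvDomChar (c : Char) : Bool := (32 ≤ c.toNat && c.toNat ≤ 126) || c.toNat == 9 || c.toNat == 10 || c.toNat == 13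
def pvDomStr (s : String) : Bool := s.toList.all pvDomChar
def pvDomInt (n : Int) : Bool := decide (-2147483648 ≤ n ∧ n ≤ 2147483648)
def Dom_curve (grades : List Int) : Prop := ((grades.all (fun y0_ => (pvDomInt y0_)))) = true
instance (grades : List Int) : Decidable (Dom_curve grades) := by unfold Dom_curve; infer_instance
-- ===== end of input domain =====

-- B replaces A's five-way if-elif cascade by a closed-form index into the letter table "ABCDF" (objective: simpler).


-- ===== PORT A =====
-- the if-elif cascade of A's loop body
def curveLetter (best g : Int) : String :=
  if g ≥ best - 10 then "A"
  else if g ≥ best - 20 then "B"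
  else if g ≥ best - 30 then "C"
  else if g ≥ best - 40 then "D"
  else "F"

def curve (grades : List Int) : List String :=
  match PySem.List.max? grades (fun y => y) with
  | none => []   -- unreachable under Pre_curve: max([]) raises ValueError
  | some best =>
      (List.range grades.length).foldl
        (fun acc (i : Nat) => acc ++ [curveLetter best ((PySem.List.pyGet? grades (Int.ofNat i)).getD 0)]) []

-- ===== PORT B =====
-- "ABCDF"[idx] : one-character string (idx always in range 0..4)
def curveTableAt (idx : Int) : String :=
  ((PySem.Str.pyGet? "ABCDF" idx).map (fun c => String.ofList [c])).getD ""

def curve_alt (grades : List Int) : List String :=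
  match PySem.List.max? grades (fun y => y) with
  | none => []   -- unreachable under Pre_curve: max([]) raises ValueError
  | some best =>
      grades.map (fun g => curveTableAt (min 4 (max 0 (PySem.Int.floordiv (best - g - 1) 10))))

-- ===== PRECONDITION & SPEC =====
-- Pre_ excludes only the empty list, on which A's max(grades) raises ValueError
def Pre_curve (grades : List Int) : Prop := grades ≠ []
instance (grades : List Int) : Decidable (Pre_curve grades) := by unfold Pre_curve; infer_instance
def pvWitness_curve : List Int := ([95, 84, 71, 60, 40])

def Spec_curve (grades : List Int) (out : List String) : Prop := out = curve_alt grades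
instance (grades : List Int) (out : List String) : Decidable (Spec_curve grades out) := by unfold Spec_curve; infer_instance

-- ===== CLAIM (what is proved, stated in full; the proofs are below) =====
def Claim_equal_curve : Prop := ∀ (grades : List Int), Dom_curve grades → Pre_curve grades → Spec_curve grades (curve grades)

-- ===== LEMMAS AND PROOFS =====

-- pointwise: the cascade letter equals the table letter, for every best and g
theorem curveLetter_eq (best g : Int) :
    curveLetter best g = curveTableAt (min 4 (max 0 (PySem.Int.floordiv (best - g - 1) 10))) := by
  unfold curveLetter
  split_ifs with h1 h2 h3 h4
  · have : PySem.Int.floordiv (best - g - 1) 10 < 1 :=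
      (PySem.Int.floordiv_lt_iff_lt_mul (by norm_num)).2 (by omega)
    have : min 4 (max 0 (PySem.Int.floordiv (best - g - 1) 10)) = 0 := by omega
    rw [this]; decide
  · have : PySem.Int.floordiv (best - g - 1) 10 = 1 :=
      (PySem.Int.floordiv_eq_iff_of_pos (by norm_num)).2 (by omega)
    have : min 4 (max 0 (PySem.Int.floordiv (best - g - 1) 10)) = 1 := by omega
    rw [this]; decide
  · have : PySem.Int.floordiv (best - g - 1) 10 = 2 :=
      (PySem.Int.floordiv_eq_iff_of_pos (by norm_num)).2 (by omega)
    have : min 4 (max 0 (PySem.Int.floordiv (best - g - 1) 10)) = 2 := by omega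
    rw [this]; decide
  · have : PySem.Int.floordiv (best - g - 1) 10 = 3 :=
      (PySem.Int.floordiv_eq_iff_of_pos (by norm_num)).2 (by omega)
    have : min 4 (max 0 (PySem.Int.floordiv (best - g - 1) 10)) = 3 := by omega
    rw [this]; decide
  · have : (4 : Int) ≤ PySem.Int.floordiv (best - g - 1) 10 :=
      (PySem.Int.le_floordiv_iff_mul_le (by norm_num)).2 (by omega)
    have : min 4 (max 0 (PySem.Int.floordiv (best - g - 1) 10)) = 4 := by omega
    rw [this]; decide

-- the index loop over range(len(grades)) is the map of the cascade over grades
theorem curve_fold_eq_map (grades : List Int) (best : Int) :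
    (List.range grades.length).foldl
      (fun acc (i : Nat) => acc ++ [curveLetter best ((PySem.List.pyGet? grades (Int.ofNat i)).getD 0)]) []
    = grades.map (fun g => curveLetter best g) := by
  rw [PySem.List.foldl_append_singleton_eq_map
        (fun (i : Nat) => curveLetter best ((PySem.List.pyGet? grades (Int.ofNat i)).getD 0))]
  simp only [List.nil_append]
  apply List.ext_getElem
  · simp
  · intro i h1 h2
    simp only [List.getElem_map, List.getElem_range, Int.ofNat_eq_natCast,
      PySem.List.pyGet?_natCast]
    simp [List.getElem?_eq_getElem (by simpa using h2)]

-- ===== VERDICT (by name: the statement is the Claim_ definition above) =====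
theorem curve_spec : Claim_equal_curve := by
  intro grades _ hpre
  unfold Spec_curve curve curve_alt
  cases grades with
  | nil => exact absurd rfl hpre
  | cons x t =>
    rw [PySem.List.max?_id_cons]
    show (List.range (x :: t).length).foldl _ [] = List.map _ (x :: t)
    rw [curve_fold_eq_map]
    apply List.map_congr_left
    intro g _
    exact curveLetter_eq _ g
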